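-- pv_equiv track=rewrite | github.com/attilaolah/math | traverse.py | traverse_3d
-- ===== SOURCE A (Python) =====
-- def traverse_2d(cur=0, limit=None):
--     """Generate (x, y) pairs.
--
--     This function iterates through points on a plane.
--
--     If limit is provided, all coordinates will be <= limit.
--
--     Yields points in this order:
--
--         (0, 0) | cur = 0
--
--         (0, 1) | cur = 1
--         (1, 0)
--         (1, 1)
--
--         (0, 2) | cur = 2
--         (1, 2)
--         (2, 0)
--         (2, 1)
--         (2, 2)
--
--         (0, 3) | cur = 3
--         …
--     """
--     while limit is None or cur <= limit:
--         for x__ in range(cur):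
--             yield x__, cur
--         for y__ in range(cur):
--             yield cur, y__
--         yield cur, cur
--         cur += 1
--
-- def traverse_3d(cur=0, limit=None):
--     """Generate (x, y, z) triplets.
--
--     This function iterates through points in 3D space.
--
--     If limit is provided, all cordinates will be <= limit.
--
--     Yields points in this order:
--
--         (0, 0, 0) | cur = 0
--
--         (0, 0, 1) | cur = 1
--         (0, 1, 0)
--         (0, 1, 1)
--         (1, 0, 0)
--         (1, 0, 1)
--         (1, 1, 0)
--         (1, 1, 1)
--
--         (0, 0, 2) | cur = 2
--         (0, 1, 2)
--         (0, 2, 0)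
--         (0, 2, 1)
--         (0, 2, 2)
--         (1, 0, 2)
--         (1, 1, 2)
--         (1, 2, 0)
--         (1, 2, 1)
--         (1, 2, 2)
--         (2, 0, 0)
--         (2, 0, 1)
--         (2, 1, 0)
--         (2, 1, 1)
--         (2, 0, 2)
--         (2, 1, 2)
--         (2, 2, 0)
--         (2, 2, 1)
--         (2, 2, 2)
--
--         (0, 0, 3) | cur = 3
--         …
--     """
--     while limit is None or cur <= limit:
--         for x__ in range(cur):
--             for y__, z__ in traverse_2d(cur, cur):
--                 yield x__, y__, z__
--         for y__, z__ in traverse_2d(limit=cur):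
--             yield cur, y__, z__
--         cur += 1
-- ===== SOURCE B (Python) =====
-- def traverse_3d(cur=0, limit=None):
--     """Dimension-generic re-implementation: shell(dim, n) yields dim-tuples
--     whose max coordinate is n, cumulative(dim, n) those with max <= n."""
--     def shell(dim, n):
--         if dim == 1:
--             yield (n,)
--             return
--         for x in range(n):
--             for rest in shell(dim - 1, n):
--                 yield (x,) + rest
--         for rest in cumulative(dim - 1, n):
--             yield (n,) + rest
--
--     def cumulative(dim, n):
--         for i in range(n + 1):
--             yield from shell(dim, i)
--
--     n = cur
--     while limit is None or n <= limit:
--         yield from shell(3, n)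
--         n += 1
-- ===== Notes on version B (the rewrite author's own statement) =====
-- stated objective: alternative
-- what changed: Replaces the hard-coded 2D/3D pair of while-loops by one dimension-generic recursion: shell(dim,n) and cumulative(dim,n) build the n-th shell and its prefix for any dimension, and traverse_3d just concatenates shell(3,n) for n = cur, cur+1, ...
import Mathlib
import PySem

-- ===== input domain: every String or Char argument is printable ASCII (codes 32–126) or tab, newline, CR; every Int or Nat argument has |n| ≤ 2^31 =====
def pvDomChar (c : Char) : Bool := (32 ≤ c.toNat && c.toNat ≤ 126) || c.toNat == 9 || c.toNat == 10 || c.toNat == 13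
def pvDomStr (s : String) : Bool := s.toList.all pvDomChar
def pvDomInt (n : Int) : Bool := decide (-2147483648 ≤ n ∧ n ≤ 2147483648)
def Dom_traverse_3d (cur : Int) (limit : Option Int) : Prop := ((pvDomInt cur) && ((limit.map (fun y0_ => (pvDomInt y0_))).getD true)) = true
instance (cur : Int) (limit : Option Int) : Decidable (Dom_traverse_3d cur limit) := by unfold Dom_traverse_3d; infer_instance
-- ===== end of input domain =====

-- B replaces the hand-written 2D/3D loop pair by one dimension-generic shell/cumulative
-- recursion (objective: alternative decomposition, same cost). Both are generators in
-- Python; the ports return the materialised finite list, so Pre_ requires limit ≠ none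
-- (with limit = None the Python generators are infinite and list() never returns).

-- ===== PORT A =====
-- traverse_2d(cur, limit) materialised: one while-iteration per `cur`, three yield groups.
def pvTrav2dA (cur limit : Int) : List (Int × Int) :=
  if cur ≤ limit then
    ((PySem.List.pyRange 0 cur 1).map (fun x => (x, cur)) ++
     (PySem.List.pyRange 0 cur 1).map (fun y => (cur, y)) ++
     [(cur, cur)]) ++ pvTrav2dA (cur + 1) limit
  else []
termination_by (limit + 1 - cur).toNat
decreasing_by omega

-- the while-loop of traverse_3d for limit = some l (acc = points yielded so far)
def pvLoopA (acc : List (Int × Int × Int)) (cur l : Int) : List (Int × Int × Int) :=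
  if cur ≤ l then
    pvLoopA
      (acc ++
        ((PySem.List.pyRange 0 cur 1).flatMap
            (fun x => (pvTrav2dA cur cur).map (fun p => (x, p.1, p.2))) ++
         (pvTrav2dA 0 cur).map (fun p => (cur, p.1, p.2))))
      (cur + 1) l
  else acc
termination_by (l + 1 - cur).toNat
decreasing_by omega

def traverse_3d (cur : Int) (limit : Option Int) : List (Int × Int × Int) :=
  match limit with
  | none => []       -- Python diverges here; excluded by Pre_traverse_3d
  | some l => pvLoopA [] cur l

-- ===== PORT B =====
-- shell(dim, n): dim-tuples (as length-dim lists) whose max coordinate is n;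
-- cumulative(dim, n): those with max ≤ n.  Faithful to Source B's mutual recursion on dim.
mutual
  def pvShellB : Nat → Int → List (List Int)
    | 0, _ => []                 -- unreachable: Source B is only called with dim ≥ 1
    | 1, n => [[n]]
    | (d + 2), n =>
        (PySem.List.pyRange 0 n 1).flatMap
          (fun x => (pvShellB (d + 1) n).map (fun rest => x :: rest)) ++
        (pvCumB (d + 1) n).map (fun rest => n :: rest)
  termination_by d _ => (d, 0)

  def pvCumB (d : Nat) (n : Int) : List (List Int) :=
    (PySem.List.pyRange 0 (n + 1) 1).flatMap (fun i => pvShellB d i)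
  termination_by (d, 1)
end

-- tuple representation of the length-3 lists Source B's shell(3, ·) yields
def pvToTriple : List Int → Int × Int × Int
  | [a, b, c] => (a, b, c)
  | _ => (0, 0, 0)

def pvLoopB (acc : List (Int × Int × Int)) (n l : Int) : List (Int × Int × Int) :=
  if n ≤ l then pvLoopB (acc ++ (pvShellB 3 n).map pvToTriple) (n + 1) l
  else acc
termination_by (l + 1 - n).toNat
decreasing_by omega

def traverse_3d_alt (cur : Int) (limit : Option Int) : List (Int × Int × Int) :=
  match limit with
  | none => []       -- Python diverges here; excluded by Pre_traverse_3d
  | some l => pvLoopB [] cur l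

-- ===== PRECONDITION & SPEC =====
-- With limit = None the Python generator is infinite, so its materialised list never
-- returns; Pre_ excludes exactly that case.
def Pre_traverse_3d (cur : Int) (limit : Option Int) : Prop := limit ≠ none
instance (cur : Int) (limit : Option Int) : Decidable (Pre_traverse_3d cur limit) := by
  unfold Pre_traverse_3d; infer_instance

def pvWitness_traverse_3d : Int × Option Int := (0, some 2)

def Spec_traverse_3d (cur : Int) (limit : Option Int) (out : List (Int × Int × Int)) : Prop := out = traverse_3d_alt cur limit
instance (cur : Int) (limit : Option Int) (out : List (Int × Int × Int)) : Decidable (Spec_traverse_3d cur limit out) := by unfold Spec_traverse_3d; infer_instance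

-- ===== CLAIM (what is proved, stated in full; the proofs are below) =====
def Claim_equal_traverse_3d : Prop := ∀ (cur : Int) (limit : Option Int), Dom_traverse_3d cur limit → Pre_traverse_3d cur limit → Spec_traverse_3d cur limit (traverse_3d cur limit)

-- ===== LEMMAS AND PROOFS =====

-- one shell of traverse_2d, as a function (pvTrav2dA's per-iteration body)
def pvShell2 (n : Int) : List (Int × Int) :=
  (PySem.List.pyRange 0 n 1).map (fun x => (x, n)) ++
  (PySem.List.pyRange 0 n 1).map (fun y => (n, y)) ++ [(n, n)]

theorem pvTrav2dA_eq (c l : Int) :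
    pvTrav2dA c l = (PySem.List.pyRange c (l + 1) 1).flatMap pvShell2 := by
  rw [pvTrav2dA]
  split
  · rename_i h
    rw [PySem.List.pyRange_one_cons (a := c) (b := l + 1) (by omega), List.flatMap_cons,
        pvTrav2dA_eq (c + 1) l, pvShell2]
  · rename_i h
    rw [PySem.List.pyRange_one_eq_nil (a := c) (b := l + 1) (by omega), List.flatMap_nil]
termination_by (l + 1 - c).toNat
decreasing_by omega

theorem pvTrav2dA_self (n : Int) : pvTrav2dA n n = pvShell2 n := by
  rw [pvTrav2dA_eq, PySem.List.pyRange_one_succ_right le_rfl,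
      PySem.List.pyRange_one_eq_nil le_rfl, List.nil_append,
      List.flatMap_cons, List.flatMap_nil, List.append_nil]

theorem pvShellB_two (n : Int) (hn : 0 ≤ n) :
    pvShellB 2 n = (pvShell2 n).map (fun p => [p.1, p.2]) := by
  rw [show (2:Nat) = 0 + 2 from rfl, pvShellB, pvCumB]
  have h1 : ∀ m : Int, pvShellB 1 m = [[m]] := fun m => by rw [pvShellB]
  have hm : ∀ (g : Int → List Int) (L : List Int), L.flatMap (fun x => [g x]) = L.map g := by
    intro g L
    induction L with
    | nil => rfl
    | cons a t ih => simp [ih]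
  simp only [h1, List.map_cons, List.map_nil]
  rw [PySem.List.pyRange_one_succ_right hn, hm (fun x => [x, n]), hm (fun i => [i])]
  simp only [pvShell2, List.map_append, List.map_map, List.map_cons, List.map_nil,
    List.append_assoc]
  rfl

theorem pvCumB_two (n : Int) :
    pvCumB 2 n = (pvTrav2dA 0 n).map (fun p => [p.1, p.2]) := by
  rw [pvCumB, pvTrav2dA_eq, List.map_flatMap]
  apply List.flatMap_congr
  intro i hi
  have : 0 ≤ i := (PySem.List.mem_pyRange_one.mp hi).1
  exact pvShellB_two i this

theorem pvBody_eq (n : Int) :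
    (pvShellB 3 n).map pvToTriple =
      (PySem.List.pyRange 0 n 1).flatMap
        (fun x => (pvTrav2dA n n).map (fun p => (x, p.1, p.2))) ++
      (pvTrav2dA 0 n).map (fun p => (n, p.1, p.2)) := by
  rw [show (3:Nat) = 1 + 2 from rfl, pvShellB]
  rw [List.map_append, List.map_flatMap, pvCumB_two, pvTrav2dA_self]
  congr 1
  · by_cases hn : 0 ≤ n
    · apply List.flatMap_congr
      intro x _
      rw [pvShellB_two n hn]
      simp [List.map_map, Function.comp, pvToTriple]
    · rw [PySem.List.pyRange_one_eq_nil (a := 0) (b := n) (by omega)]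
      simp
  · simp [List.map_map, Function.comp, pvToTriple]

theorem pvLoop_eq (fuel : Nat) :
    ∀ (acc : List (Int × Int × Int)) (c l : Int), (l + 1 - c).toNat ≤ fuel →
      pvLoopA acc c l = pvLoopB acc c l := by
  induction fuel with
  | zero =>
      intro acc c l h
      rw [pvLoopA, pvLoopB]
      have : ¬ c ≤ l := by omega
      simp [this]
  | succ k ih =>
      intro acc c l h
      rw [pvLoopA, pvLoopB]
      split
      · rename_i hc
        rw [← pvBody_eq, ih _ (c + 1) l (by omega)]
      · rfl

-- ===== VERDICT (by name: the statement is the Claim_ definition above) =====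
theorem traverse_3d_spec : Claim_equal_traverse_3d := by
  intro cur limit _ hpre
  unfold Spec_traverse_3d
  cases limit with
  | none => exact absurd rfl hpre
  | some l =>
      show pvLoopA [] cur l = pvLoopB [] cur l
      exact pvLoop_eq (l + 1 - cur).toNat [] cur l le_rfl
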